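-- pv_equiv track=rewrite | github.com/t-vaibhavkumar/ScrumPilotNLP | backend/evaluation/run_evaluation.py | match_actions
-- ===== SOURCE A (Python) =====
-- def normalize(text):
--     return (text or "").lower().strip()
--
-- def match_actions(predicted, expected):
--     matched = 0
--
--     for exp in expected:
--         exp_intent = exp["action"]
--         exp_summary = normalize(exp.get("summary", ""))
--         exp_assignee = normalize(exp.get("assignee", ""))
--
--         for pred in predicted:
--             if (
--                 pred.get("action") == exp_intent
--                 and (not exp_summary or exp_summary in normalize(pred.get("summary")))
--                 and (not exp_assignee or exp_assignee == normalize(pred.get("assignee")))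
--             ):
--                 matched += 1
--                 break
--
--     return matched
-- ===== SOURCE B (Python) =====
-- def normalize(text):
--     return (text or "").lower().strip()
--
-- def _matches(pred, exp):
--     exp_summary = normalize(exp.get("summary", ""))
--     exp_assignee = normalize(exp.get("assignee", ""))
--     return (
--         pred.get("action") == exp["action"]
--         and (not exp_summary or exp_summary in normalize(pred.get("summary")))
--         and (not exp_assignee or exp_assignee == normalize(pred.get("assignee")))
--     )
--
-- def match_actions(predicted, expected):
--     # inverted loop order: one pass over predicted, eliminating matched expected
--     # items from a shrinking worklist; answer = total expected minus survivors
--     remaining = list(expected)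
--     for pred in predicted:
--         remaining = [exp for exp in remaining if not _matches(pred, exp)]
--         if not remaining:
--             break
--     return len(expected) - len(remaining)
-- ===== Notes on version B (the rewrite author's own statement) =====
-- stated objective: alternative
-- what changed: B inverts the loop nesting: instead of scanning all of predicted for each expected item, it makes one pass over predicted, filtering matched items out of a shrinking worklist of expected entries (with early exit when it is empty), and returns len(expected) minus the survivors; correct because an expected item is counted iff some predicted item matches it, which is order-independent.
import Mathlib
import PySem

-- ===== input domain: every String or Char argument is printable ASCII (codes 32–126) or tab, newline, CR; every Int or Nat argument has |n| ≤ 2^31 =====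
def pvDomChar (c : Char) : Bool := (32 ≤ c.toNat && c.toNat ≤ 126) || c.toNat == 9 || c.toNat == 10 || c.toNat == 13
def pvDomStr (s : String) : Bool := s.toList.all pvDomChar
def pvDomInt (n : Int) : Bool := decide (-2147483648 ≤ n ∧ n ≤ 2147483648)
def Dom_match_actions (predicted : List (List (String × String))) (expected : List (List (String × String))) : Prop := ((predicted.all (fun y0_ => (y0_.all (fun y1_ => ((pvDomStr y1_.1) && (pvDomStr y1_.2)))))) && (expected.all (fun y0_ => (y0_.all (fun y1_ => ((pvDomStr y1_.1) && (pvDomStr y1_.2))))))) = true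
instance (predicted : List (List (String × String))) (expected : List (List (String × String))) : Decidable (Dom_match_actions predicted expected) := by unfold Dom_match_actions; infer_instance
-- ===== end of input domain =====

-- B inverts the loop nesting (one pass over predicted filtering a worklist of expected); return values proved equal wherever A returns.

-- shared helper: Python's normalize(text) = (text or "").lower().strip()
def pvNormalize (t : String) : String := PySem.Str.strip (PySem.Str.lower t)

-- pred.get("action") (None = missing key)
def pvAction (pred : List (String × String)) : Option String := (PySem.Dict.mk pred).get? "action"

-- the summary/assignee part of the match condition (identical text in both Pythons)
def pvCond (es ea : String) (pred : List (String × String)) : Bool :=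
  (es == "" || PySem.Str.isIn es (pvNormalize (((PySem.Dict.mk pred).get? "summary").getD ""))) &&
  (ea == "" || ea == pvNormalize (((PySem.Dict.mk pred).get? "assignee").getD ""))

-- ===== PORT A =====
-- A's inner 'for pred in predicted: … matched += 1; break'
def pvLoopA (intent es ea : String) : List (List (String × String)) → Int
  | [] => 0
  | p :: rest =>
    if (pvAction p == some intent) && pvCond es ea p then 1
    else pvLoopA intent es ea rest

def match_actions (predicted : List (List (String × String))) (expected : List (List (String × String))) : Int :=
  expected.foldl (fun matched exp =>
    let intent := ((PySem.Dict.mk exp).get? "action").getD ""   -- exp["action"]; Pre_ guarantees the key is present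
    let es := pvNormalize (((PySem.Dict.mk exp).get? "summary").getD "")
    let ea := pvNormalize (((PySem.Dict.mk exp).get? "assignee").getD "")
    matched + pvLoopA intent es ea predicted) 0

-- ===== PORT B =====
-- Source B's _matches(pred, exp)
def pvMatchesB (pred exp : List (String × String)) : Bool :=
  (pvAction pred == some (((PySem.Dict.mk exp).get? "action").getD "")) &&
  pvCond (pvNormalize (((PySem.Dict.mk exp).get? "summary").getD ""))
         (pvNormalize (((PySem.Dict.mk exp).get? "assignee").getD "")) pred

-- Source B's 'for pred in predicted: remaining = [...]; if not remaining: break'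
def pvLoopB : List (List (String × String)) → List (List (String × String)) → List (List (String × String))
  | [], remaining => remaining
  | p :: ps, remaining =>
    let remaining' := remaining.filter (fun exp => !pvMatchesB p exp)
    if remaining'.isEmpty then remaining' else pvLoopB ps remaining'

def match_actions_alt (predicted : List (List (String × String))) (expected : List (List (String × String))) : Int :=
  (expected.length : Int) - ((pvLoopB predicted expected).length : Int)

-- ===== PRECONDITION & SPEC =====
-- Pre_ excludes exactly the inputs on which A's exp["action"] raises KeyError.
def Pre_match_actions (predicted : List (List (String × String))) (expected : List (List (String × String))) : Prop :=
  ∀ e ∈ expected, (PySem.Dict.mk e).contains "action" = true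
instance (predicted : List (List (String × String))) (expected : List (List (String × String))) : Decidable (Pre_match_actions predicted expected) := by unfold Pre_match_actions; infer_instance
def pvWitness_match_actions : (List (List (String × String))) × (List (List (String × String))) :=
  ([[("action", "create"), ("summary", "Fix the Bug")]], [[("action", "create"), ("summary", "bug")]])

def Spec_match_actions (predicted : List (List (String × String))) (expected : List (List (String × String))) (out : Int) : Prop := out = match_actions_alt predicted expected
instance (predicted : List (List (String × String))) (expected : List (List (String × String))) (out : Int) : Decidable (Spec_match_actions predicted expected out) := by unfold Spec_match_actions; infer_instance

-- ===== CLAIM (what is proved, stated in full; the proofs are below) =====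
def Claim_equal_match_actions : Prop := ∀ (predicted : List (List (String × String))) (expected : List (List (String × String))), Dom_match_actions predicted expected → Pre_match_actions predicted expected → Spec_match_actions predicted expected (match_actions predicted expected)

-- ===== LEMMAS AND PROOFS =====

-- A's inner loop returns 1 iff some predicted item matches exp
theorem pv_loopA_eq (intent es ea : String) (l : List (List (String × String))) :
    pvLoopA intent es ea l
      = if l.any (fun p => (pvAction p == some intent) && pvCond es ea p) then 1 else 0 := by
  induction l with
  | nil => simp [pvLoopA]
  | cons p rest ih =>
    by_cases h : ((pvAction p == some intent) && pvCond es ea p) = true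
    · simp [pvLoopA, h]
    · simp [pvLoopA, h, ih]

-- a fold that adds an indicator counts the satisfying elements
theorem pv_foldl_count {α : Type} (q : α → Bool) (l : List α) (c : Int) :
    l.foldl (fun m a => m + if q a then 1 else 0) c = c + (l.countP q : Int) := by
  induction l generalizing c with
  | nil => simp
  | cons a rest ih =>
    simp only [List.foldl_cons, List.countP_cons, ih]
    cases h : q a <;> simp [h] <;> omega

-- B's worklist loop keeps exactly the expected items matched by no predicted item
theorem pv_loopB_eq (preds rem : List (List (String × String))) :
    pvLoopB preds rem = rem.filter (fun exp => !preds.any (fun p => pvMatchesB p exp)) := by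
  induction preds generalizing rem with
  | nil => simp [pvLoopB]
  | cons p ps ih =>
    simp only [pvLoopB]
    by_cases h : (rem.filter (fun exp => !pvMatchesB p exp)).isEmpty
    · rw [if_pos h, List.isEmpty_iff] at *
      rw [h]
      symm
      rw [List.filter_eq_nil_iff]
      intro e he hb
      have h2 := List.filter_eq_nil_iff.mp h e he
      simp only [List.any_cons, Bool.not_or, Bool.and_eq_true, Bool.not_eq_eq_eq_not,
        Bool.not_true] at hb h2
      exact absurd hb.1 (by simpa using h2)
    · rw [if_neg h, ih, List.filter_filter]
      congr 1
      funext e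
      cases hc : pvMatchesB p e <;> simp [hc]

-- ===== VERDICT (by name: the statement is the Claim_ definition above) =====
theorem match_actions_spec : Claim_equal_match_actions := by
  intro predicted expected _ _
  unfold Spec_match_actions match_actions match_actions_alt
  have hstep : (fun (matched : Int) (exp : List (String × String)) =>
      let intent := ((PySem.Dict.mk exp).get? "action").getD ""
      let es := pvNormalize (((PySem.Dict.mk exp).get? "summary").getD "")
      let ea := pvNormalize (((PySem.Dict.mk exp).get? "assignee").getD "")
      matched + pvLoopA intent es ea predicted)
      = (fun (matched : Int) (exp : List (String × String)) =>
      matched + if predicted.any (fun p => pvMatchesB p exp) then 1 else 0) := by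
    funext matched exp
    simp only [pv_loopA_eq, pvMatchesB]
    rfl
  rw [hstep, pv_foldl_count, pv_loopB_eq]
  have hsplit : ∀ (l : List (List (String × String))),
      l.countP (fun exp => predicted.any (fun p => pvMatchesB p exp))
        + (l.filter (fun exp => !predicted.any (fun p => pvMatchesB p exp))).length
        = l.length := by
    intro l
    induction l with
    | nil => simp
    | cons a r ih =>
      simp only [List.countP_cons, List.filter_cons, List.length_cons]
      cases h : predicted.any (fun p => pvMatchesB p a) <;> simp [h] <;> omega
  have h := hsplit expected
  omega
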